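-- pv_equiv track=rewrite | github.com/2017602group11/Python_Learning | ElementsOfProgInterviews/Chapter-5/Multiplication.py | multiply3
-- ===== SOURCE A (Python) =====
-- def multiply3(x,y):
--     p=0
--     if y<0:
--         return -multiply3(x,-y)
--     while(y):
--         if(y&1):
--             p=p+x
--         y>>=1
--         x<<=1
--     return p
-- ===== SOURCE B (Python) =====
-- def multiply3(x, y):
--     if y < 0:
--         return -multiply3(x, -y)
--     return x * y
-- ===== Notes on version B (the rewrite author's own statement) =====
-- stated objective: simpler
-- what changed: Replaces the shift-and-add bit loop with the closed form x*y (keeping the recursive negative-y guard), proved equal to the loop for all integers.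
import Mathlib
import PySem

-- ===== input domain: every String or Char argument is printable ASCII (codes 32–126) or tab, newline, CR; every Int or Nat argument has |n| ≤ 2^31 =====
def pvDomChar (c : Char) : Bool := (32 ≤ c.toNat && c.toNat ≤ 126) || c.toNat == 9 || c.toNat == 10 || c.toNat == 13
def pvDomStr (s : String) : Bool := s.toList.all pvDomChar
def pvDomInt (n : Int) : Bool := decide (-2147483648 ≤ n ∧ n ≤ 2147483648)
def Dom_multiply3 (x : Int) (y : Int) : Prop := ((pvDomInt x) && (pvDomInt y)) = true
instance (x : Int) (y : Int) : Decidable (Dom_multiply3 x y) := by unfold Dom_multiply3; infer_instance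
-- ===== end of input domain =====

-- B replaces A's shift-and-add bit loop with the closed form x*y (same recursive negative-y guard); objective: simpler.


-- ===== PORT A =====
-- A's while(y) loop; the loop is only ever entered with y ≥ 0 (negative y is handled
-- by the recursive guard first), so the guard is written 0 < y for totality.
-- y&1 → PySem.Int.band y 1; y>>=1 → y >>> 1; x<<=1 → x <<< 1 (Python-exact).
def multiply3Loop (x y p : Int) : Int :=
  if h : 0 < y then
    multiply3Loop (x <<< (1:Nat)) (y >>> (1:Nat)) (if PySem.Int.band y 1 ≠ 0 then p + x else p)
  else p
termination_by y.toNat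
decreasing_by
  have : y >>> (1:Nat) = y / 2 := by simp [Int.shiftRight_eq_div_pow]
  omega

def multiply3 (x : Int) (y : Int) : Int :=
  if y < 0 then -(multiply3Loop x (-y) 0) else multiply3Loop x y 0

-- ===== PORT B =====
def multiply3_alt (x : Int) (y : Int) : Int :=
  if h : y < 0 then -(multiply3_alt x (-y)) else x * y
termination_by (if y < 0 then 1 else 0)
decreasing_by simp [h]; omega

-- ===== PRECONDITION & SPEC =====
def Spec_multiply3 (x : Int) (y : Int) (out : Int) : Prop := out = multiply3_alt x y
instance (x : Int) (y : Int) (out : Int) : Decidable (Spec_multiply3 x y out) := by unfold Spec_multiply3; infer_instance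

-- ===== CLAIM (what is proved, stated in full; the proofs are below) =====
def Claim_equal_multiply3 : Prop := ∀ (x : Int) (y : Int), Dom_multiply3 x y → Spec_multiply3 x y (multiply3 x y)

-- ===== LEMMAS AND PROOFS =====
theorem multiply3Loop_eq (x y p : Int) (h : 0 ≤ y) : multiply3Loop x y p = p + x * y := by
  obtain ⟨n, rfl⟩ := Int.eq_ofNat_of_zero_le h
  induction n using Nat.strong_induction_on generalizing x p with
  | _ n ih =>
    rw [multiply3Loop.eq_def]
    by_cases hp : 0 < (n : Int)
    · have hn : 0 < n := by exact_mod_cast hp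
      have hsr : (n : Int) >>> (1:Nat) = ((n / 2 : Nat) : Int) := by
        rw [Int.shiftRight_eq_div_pow, pow_one]
        omega
      have hb : PySem.Int.band (n : Int) 1 = ((n % 2 : Nat) : Int) := by
        rw [PySem.Int.band_one]
        exact_mod_cast PySem.Int.mod_natCast n 2
      have hif : (if PySem.Int.band (n : Int) 1 ≠ 0 then p + x else p)
          = p + x * ((n % 2 : Nat) : Int) := by
        rw [hb]
        rcases Nat.mod_two_eq_zero_or_one n with he | he <;> rw [he] <;> norm_num
      rw [dif_pos hp, hsr, hif, Int.shiftLeft_eq, pow_one,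
        ih (n / 2) (by omega) _ _ (by positivity)]
      have h2 : (n : Int) = 2 * ((n / 2 : Nat) : Int) + ((n % 2 : Nat) : Int) := by
        push_cast; omega
      rw [h2]; ring
    · have h0 : (n : Int) = 0 := by omega
      rw [dif_neg hp, h0, mul_zero, add_zero]

theorem multiply3_alt_eq (x y : Int) : multiply3_alt x y = x * y := by
  rw [multiply3_alt.eq_def]
  by_cases h : y < 0
  · rw [dif_pos h, multiply3_alt.eq_def, dif_neg (by omega : ¬ -y < 0)]; ring
  · rw [dif_neg h]

-- ===== VERDICT (by name: the statement is the Claim_ definition above) =====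
theorem multiply3_spec : Claim_equal_multiply3 := by
  intro x y _
  unfold Spec_multiply3 multiply3
  rw [multiply3_alt_eq]
  by_cases h : y < 0
  · rw [if_pos h, multiply3Loop_eq x (-y) 0 (by omega)]; ring
  · rw [if_neg h, multiply3Loop_eq x y 0 (by omega), zero_add]
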